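-- pv_equiv track=rewrite | github.com/Snehpatel101/Research | src/stages/reporting/formatters.py | _apply_status_styling
-- ===== SOURCE A (Python) =====
-- def _apply_status_styling(html: str) -> str:
--     """Apply CSS classes to status indicators."""
--     replacements = [
--         ('PASS', '<span class="pass">PASS</span>'),
--         ('FAIL', '<span class="fail">FAIL</span>'),
--         ('WARNING', '<span class="warning">WARNING</span>'),
--         ('PASSED', '<span class="pass">PASSED</span>'),
--         ('FAILED', '<span class="fail">FAILED</span>'),
--     ]
--
--     for old, new in replacements:
--         # Only replace in table cells to avoid replacing in prose
--         html = html.replace(f'<td>{old}</td>', f'<td>{new}</td>')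
--         html = html.replace(f'| {old} |', f'| {new} |')
--
--     return html
-- ===== SOURCE B (Python) =====
-- def _style_word(html, word, cls):
--     """One left-to-right scan styling both cell formats of a single status word."""
--     td = f'<td>{word}</td>'
--     bar = f'| {word} |'
--     span = f'<span class="{cls}">{word}</span>'
--     td_rep = f'<td>{span}</td>'
--     bar_rep = f'| {span} |'
--     out = []
--     i = 0
--     n = len(html)
--     while i < n:
--         if html.startswith(td, i):
--             out.append(td_rep)
--             i += len(td)
--         elif html.startswith(bar, i):
--             out.append(bar_rep)
--             i += len(bar)
--         else:
--             out.append(html[i])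
--             i += 1
--     return ''.join(out)
--
--
-- def _apply_status_styling(html: str) -> str:
--     """Apply CSS classes to status indicators."""
--     for word, cls in [('PASS', 'pass'), ('FAIL', 'fail'), ('WARNING', 'warning'),
--                       ('PASSED', 'pass'), ('FAILED', 'fail')]:
--         html = _style_word(html, word, cls)
--     return html
-- ===== Notes on version B (the rewrite author's own statement) =====
-- stated objective: alternative
-- what changed: Replaces the ten sequential str.replace scans by a per-status single left-to-right scan with an explicit index that matches both cell formats (<td>WORD</td> and | WORD |) simultaneously and copies everything else, halving the number of passes over the string.
import Mathlib
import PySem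

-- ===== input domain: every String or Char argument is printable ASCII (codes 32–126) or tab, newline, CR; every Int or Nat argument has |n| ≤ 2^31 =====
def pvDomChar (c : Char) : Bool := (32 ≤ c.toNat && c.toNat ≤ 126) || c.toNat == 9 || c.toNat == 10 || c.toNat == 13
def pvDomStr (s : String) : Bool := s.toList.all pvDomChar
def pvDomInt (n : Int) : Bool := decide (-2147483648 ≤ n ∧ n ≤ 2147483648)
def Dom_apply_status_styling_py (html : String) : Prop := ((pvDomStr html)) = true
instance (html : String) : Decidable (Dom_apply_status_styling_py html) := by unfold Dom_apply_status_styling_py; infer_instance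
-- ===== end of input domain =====

-- B replaces the ten sequential str.replace scans by one explicit left-to-right scan per
-- status word that styles both cell formats of that word in a single pass (objective: alternative).

-- ===== PORT A =====
def apply_status_styling_py (html : String) : String :=
  let replacements : List (String × String) := [
    ("PASS", "<span class=\"pass\">PASS</span>"),
    ("FAIL", "<span class=\"fail\">FAIL</span>"),
    ("WARNING", "<span class=\"warning\">WARNING</span>"),
    ("PASSED", "<span class=\"pass\">PASSED</span>"),
    ("FAILED", "<span class=\"fail\">FAILED</span>")]
  replacements.foldl (fun h p =>
    let h1 := PySem.Str.replace h ("<td>" ++ p.1 ++ "</td>") ("<td>" ++ p.2 ++ "</td>")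
    PySem.Str.replace h1 ("| " ++ p.1 ++ " |") ("| " ++ p.2 ++ " |")) html

-- ===== PORT B =====
-- the while loop of Source B's _style_word: one scan, matching the <td> cell, the | cell, or copying a char
def styleGo (td tdRep bar barRep : List Char) : List Char → List Char
  | [] => []
  | c :: t =>
    if td.isPrefixOf (c :: t) then tdRep ++ styleGo td tdRep bar barRep (t.drop (td.length - 1))
    else if bar.isPrefixOf (c :: t) then barRep ++ styleGo td tdRep bar barRep (t.drop (bar.length - 1))
    else c :: styleGo td tdRep bar barRep t
termination_by s => s.length
decreasing_by all_goals (simp; try omega)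

def styleWord (html word cls : String) : String :=
  let span := "<span class=\"" ++ cls ++ "\">" ++ word ++ "</span>"
  String.ofList (styleGo ("<td>" ++ word ++ "</td>").toList ("<td>" ++ span ++ "</td>").toList
    ("| " ++ word ++ " |").toList ("| " ++ span ++ " |").toList html.toList)

def apply_status_styling_py_alt (html : String) : String :=
  [("PASS", "pass"), ("FAIL", "fail"), ("WARNING", "warning"),
   ("PASSED", "pass"), ("FAILED", "fail")].foldl (fun h p => styleWord h p.1 p.2) html

-- ===== PRECONDITION & SPEC =====
def Spec_apply_status_styling_py (html : String) (out : String) : Prop := out = apply_status_styling_py_alt html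
instance (html : String) (out : String) : Decidable (Spec_apply_status_styling_py html out) := by unfold Spec_apply_status_styling_py; infer_instance

-- ===== CLAIM (what is proved, stated in full; the proofs are below) =====
def Claim_equal_apply_status_styling_py : Prop := ∀ (html : String), Dom_apply_status_styling_py html → Spec_apply_status_styling_py html (apply_status_styling_py html)

-- ===== LEMMAS AND PROOFS =====

-- clean recursive characterisation of Python's str.replace for a nonempty pattern
def rep (old new : List Char) : List Char → List Char
  | [] => []
  | c :: t =>
    if old.isPrefixOf (c :: t) then new ++ rep old new (t.drop (old.length - 1))
    else c :: rep old new t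
termination_by s => s.length
decreasing_by all_goals (simp; try omega)

lemma go_eq (old new : List Char) (hold : old ≠ []) :
    ∀ (fuel : Nat) (l acc : List Char), l.length ≤ fuel →
      PySem.Chars.replace.go old new fuel l acc = acc.reverse ++ rep old new l := by
  intro fuel
  induction fuel with
  | zero =>
    intro l acc hl
    have hnil : l = [] := by cases l <;> simp_all
    subst hnil
    rw [PySem.Chars.replace.go.eq_def]
    simp [rep]
  | succ n ih =>
    intro l acc hl
    cases l with
    | nil => rw [PySem.Chars.replace.go.eq_def]; simp [rep]
    | cons c t =>
      rw [PySem.Chars.replace.go.eq_def]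
      by_cases hp : old.isPrefixOf (c :: t) = true
      · simp only [hp, if_true]
        have hdrop : List.drop old.length (c :: t) = t.drop (old.length - 1) := by
          cases old with
          | nil => exact absurd rfl hold
          | cons o os => simp
        have hlen : (t.drop (old.length - 1)).length ≤ n := by
          simp at hl ⊢; omega
        rw [hdrop, ih _ _ hlen]
        rw [rep]
        simp [hp]
      · simp only [hp]
        have hlen : t.length ≤ n := by simp at hl; omega
        rw [ih _ _ hlen]
        rw [rep]
        simp [hp]

lemma replace_eq_rep (s old new : List Char) (hold : old ≠ []) :
    PySem.Chars.replace s old new = rep old new s := by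
  unfold PySem.Chars.replace
  have he : old.isEmpty = false := by cases old <;> simp_all
  rw [he]
  simpa using go_eq old new hold s.length s [] le_rfl

-- a replace pass distributes over a prefix that does not contain the pattern's head char
lemma rep_append (pat r : List Char) (ph : Char) (hh : pat.head? = some ph) :
    ∀ (pre x : List Char), ph ∉ pre → rep pat r (pre ++ x) = pre ++ rep pat r x := by
  intro pre
  induction pre with
  | nil => simp
  | cons c p ih =>
    intro x hnp
    have hc : ph ≠ c := by simp at hnp; tauto
    have hnp' : ph ∉ p := by simp at hnp; tauto
    cases pat with
    | nil => simp at hh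
    | cons a q =>
      have ha : a = ph := by simpa using hh
      subst ha
      rw [List.cons_append, rep]
      have hpre : (a :: q).isPrefixOf (c :: (p ++ x)) = false := by
        simp [List.isPrefixOf]
        intro h; exact absurd h hc
      rw [hpre]
      simp only [Bool.false_eq_true, if_false]
      rw [ih x hnp', List.cons_append]

-- a replace pass whose pattern and replacement start with '<' cannot create a '<'-free prefix
lemma rep_prefix (td tdRep : List Char) (h2 : tdRep.head? = some '<') :
    ∀ (x q : List Char), '<' ∉ q → q.isPrefixOf (rep td tdRep x) = true → q.isPrefixOf x = true := by
  intro x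
  induction x with
  | nil =>
    intro q hq hpre
    rw [rep] at hpre
    cases q with
    | nil => simp
    | cons qc q' => simp [List.isPrefixOf] at hpre
  | cons c t ih =>
    intro q hq hpre
    rw [rep] at hpre
    by_cases hp : td.isPrefixOf (c :: t) = true
    · simp only [hp, if_true] at hpre
      cases q with
      | nil => simp
      | cons qc q' =>
        cases tdRep with
        | nil => simp at h2
        | cons rc rs =>
          simp at h2
          subst h2
          simp [List.isPrefixOf] at hpre
          exact absurd (by simp [hpre.1]) hq
    · simp only [hp] at hpre
      cases q with
      | nil => simp
      | cons qc q' =>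
        simp [List.isPrefixOf] at hpre ⊢
        refine ⟨hpre.1, ?_⟩
        have := ih q' (by simp at hq; tauto) (List.isPrefixOf_iff_prefix.mpr hpre.2)
        exact List.isPrefixOf_iff_prefix.mp this

-- fusing the two replace passes of one status word into the single scan styleGo
lemma fusion (td tdRep bar barRep : List Char)
    (h1 : td.head? = some '<') (h2 : tdRep.head? = some '<')
    (h3 : bar.head? = some '|') (h4 : '<' ∉ bar) (h5 : '|' ∉ tdRep) :
    ∀ (n : Nat) (s : List Char), s.length ≤ n →
      rep bar barRep (rep td tdRep s) = styleGo td tdRep bar barRep s := by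
  intro n
  induction n with
  | zero =>
    intro s hs
    have : s = [] := by cases s <;> simp_all
    subst this
    rw [rep, rep, styleGo]
  | succ n ih =>
    intro s hs
    cases s with
    | nil => rw [rep, rep, styleGo]
    | cons c t =>
      by_cases hptd : td.isPrefixOf (c :: t) = true
      · -- the <td> cell matches here
        rw [rep, if_pos hptd]
        rw [rep_append bar barRep '|' h3 tdRep _ h5]
        rw [styleGo, if_pos hptd]
        have hlen : (t.drop (td.length - 1)).length ≤ n := by simp at hs ⊢; omega
        rw [ih _ hlen]
      · by_cases hpbar : bar.isPrefixOf (c :: t) = true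
        · -- the | cell matches here
          obtain ⟨u, hu⟩ := List.isPrefixOf_iff_prefix.mp hpbar
          cases bar with
          | nil => simp at h3
          | cons bc bs =>
            have hbc : bc = '|' := by simpa using h3
            subst hbc
            have hcons := hu
            rw [List.cons_append] at hcons
            injection hcons with hc ht
            have hulen : u.length ≤ n := by
              have hl : (bs ++ u).length = t.length := by rw [ht]
              simp at hl hs; omega
            have hdrop : t.drop (('|' :: bs).length - 1) = u := by
              rw [← ht]; simp
            have e1 : rep td tdRep (c :: t) = ('|' :: bs) ++ rep td tdRep u := by
              rw [← hu]; exact rep_append td tdRep '<' h1 _ u h4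
            have e2 : rep ('|' :: bs) barRep (('|' :: bs) ++ rep td tdRep u)
                = barRep ++ rep ('|' :: bs) barRep (rep td tdRep u) := by
              have hpref : ('|' :: bs).isPrefixOf ('|' :: (bs ++ rep td tdRep u)) = true :=
                List.isPrefixOf_iff_prefix.mpr ⟨rep td tdRep u, by simp⟩
              rw [List.cons_append, rep, if_pos hpref,
                show ('|' :: bs).length - 1 = bs.length from by simp, List.drop_left]
            rw [e1, e2, ih _ hulen, styleGo, if_neg (by simp [hptd]), if_pos hpbar, hdrop]
        · -- no match here: copy one char
          rw [rep, if_neg (by simp [hptd])]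
          have hnobar : bar.isPrefixOf (c :: rep td tdRep t) ≠ true := by
            intro hcon
            have : bar.isPrefixOf (rep td tdRep (c :: t)) = true := by
              rw [rep, if_neg (by simp [hptd])]; exact hcon
            exact hpbar (rep_prefix td tdRep h2 _ bar h4 this)
          rw [rep, if_neg hnobar]
          rw [styleGo, if_neg (by simp [hptd]), if_neg (by simp [hpbar])]
          have hlen : t.length ≤ n := by simp at hs; omega
          rw [ih _ hlen]

-- lifting the fusion to Python strings and str.replace
lemma word_fusion (h tdS tdRepS barS barRepS : String)
    (h1 : tdS.toList.head? = some '<') (h2 : tdRepS.toList.head? = some '<')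
    (h3 : barS.toList.head? = some '|') (h4 : '<' ∉ barS.toList) (h5 : '|' ∉ tdRepS.toList) :
    PySem.Str.replace (PySem.Str.replace h tdS tdRepS) barS barRepS
      = String.ofList (styleGo tdS.toList tdRepS.toList barS.toList barRepS.toList h.toList) := by
  apply String.toList_inj.mp
  rw [PySem.Str.toList_replace, PySem.Str.toList_replace]
  have htd : tdS.toList ≠ [] := by cases hx : tdS.toList <;> simp_all
  have hbar : barS.toList ≠ [] := by cases hx : barS.toList <;> simp_all
  rw [replace_eq_rep _ _ _ hbar, replace_eq_rep _ _ _ htd, String.toList_ofList]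
  exact fusion _ _ _ _ h1 h2 h3 h4 h5 h.toList.length _ le_rfl

lemma step_PASS (h : String) :
    PySem.Str.replace (PySem.Str.replace h ("<td>" ++ "PASS" ++ "</td>") ("<td>" ++ "<span class=\"pass\">PASS</span>" ++ "</td>"))
      ("| " ++ "PASS" ++ " |") ("| " ++ "<span class=\"pass\">PASS</span>" ++ " |") = styleWord h "PASS" "pass" := by
  rw [word_fusion h _ _ _ _ (by decide) (by decide) (by decide) (by decide) (by decide)]
  unfold styleWord
  rw [show ("<td>" ++ "<span class=\"pass\">PASS</span>" ++ "</td>").toList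
        = ("<td>" ++ ("<span class=\"" ++ "pass" ++ "\">" ++ "PASS" ++ "</span>") ++ "</td>").toList from by decide,
      show ("| " ++ "<span class=\"pass\">PASS</span>" ++ " |").toList
        = ("| " ++ ("<span class=\"" ++ "pass" ++ "\">" ++ "PASS" ++ "</span>") ++ " |").toList from by decide]

lemma step_FAIL (h : String) :
    PySem.Str.replace (PySem.Str.replace h ("<td>" ++ "FAIL" ++ "</td>") ("<td>" ++ "<span class=\"fail\">FAIL</span>" ++ "</td>"))
      ("| " ++ "FAIL" ++ " |") ("| " ++ "<span class=\"fail\">FAIL</span>" ++ " |") = styleWord h "FAIL" "fail" := by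
  rw [word_fusion h _ _ _ _ (by decide) (by decide) (by decide) (by decide) (by decide)]
  unfold styleWord
  rw [show ("<td>" ++ "<span class=\"fail\">FAIL</span>" ++ "</td>").toList
        = ("<td>" ++ ("<span class=\"" ++ "fail" ++ "\">" ++ "FAIL" ++ "</span>") ++ "</td>").toList from by decide,
      show ("| " ++ "<span class=\"fail\">FAIL</span>" ++ " |").toList
        = ("| " ++ ("<span class=\"" ++ "fail" ++ "\">" ++ "FAIL" ++ "</span>") ++ " |").toList from by decide]

lemma step_WARNING (h : String) :
    PySem.Str.replace (PySem.Str.replace h ("<td>" ++ "WARNING" ++ "</td>") ("<td>" ++ "<span class=\"warning\">WARNING</span>" ++ "</td>"))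
      ("| " ++ "WARNING" ++ " |") ("| " ++ "<span class=\"warning\">WARNING</span>" ++ " |") = styleWord h "WARNING" "warning" := by
  rw [word_fusion h _ _ _ _ (by decide) (by decide) (by decide) (by decide) (by decide)]
  unfold styleWord
  rw [show ("<td>" ++ "<span class=\"warning\">WARNING</span>" ++ "</td>").toList
        = ("<td>" ++ ("<span class=\"" ++ "warning" ++ "\">" ++ "WARNING" ++ "</span>") ++ "</td>").toList from by decide,
      show ("| " ++ "<span class=\"warning\">WARNING</span>" ++ " |").toList
        = ("| " ++ ("<span class=\"" ++ "warning" ++ "\">" ++ "WARNING" ++ "</span>") ++ " |").toList from by decide]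

lemma step_PASSED (h : String) :
    PySem.Str.replace (PySem.Str.replace h ("<td>" ++ "PASSED" ++ "</td>") ("<td>" ++ "<span class=\"pass\">PASSED</span>" ++ "</td>"))
      ("| " ++ "PASSED" ++ " |") ("| " ++ "<span class=\"pass\">PASSED</span>" ++ " |") = styleWord h "PASSED" "pass" := by
  rw [word_fusion h _ _ _ _ (by decide) (by decide) (by decide) (by decide) (by decide)]
  unfold styleWord
  rw [show ("<td>" ++ "<span class=\"pass\">PASSED</span>" ++ "</td>").toList
        = ("<td>" ++ ("<span class=\"" ++ "pass" ++ "\">" ++ "PASSED" ++ "</span>") ++ "</td>").toList from by decide,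
      show ("| " ++ "<span class=\"pass\">PASSED</span>" ++ " |").toList
        = ("| " ++ ("<span class=\"" ++ "pass" ++ "\">" ++ "PASSED" ++ "</span>") ++ " |").toList from by decide]

lemma step_FAILED (h : String) :
    PySem.Str.replace (PySem.Str.replace h ("<td>" ++ "FAILED" ++ "</td>") ("<td>" ++ "<span class=\"fail\">FAILED</span>" ++ "</td>"))
      ("| " ++ "FAILED" ++ " |") ("| " ++ "<span class=\"fail\">FAILED</span>" ++ " |") = styleWord h "FAILED" "fail" := by
  rw [word_fusion h _ _ _ _ (by decide) (by decide) (by decide) (by decide) (by decide)]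
  unfold styleWord
  rw [show ("<td>" ++ "<span class=\"fail\">FAILED</span>" ++ "</td>").toList
        = ("<td>" ++ ("<span class=\"" ++ "fail" ++ "\">" ++ "FAILED" ++ "</span>") ++ "</td>").toList from by decide,
      show ("| " ++ "<span class=\"fail\">FAILED</span>" ++ " |").toList
        = ("| " ++ ("<span class=\"" ++ "fail" ++ "\">" ++ "FAILED" ++ "</span>") ++ " |").toList from by decide]

-- ===== VERDICT (by name: the statement is the Claim_ definition above) =====
theorem apply_status_styling_py_spec : Claim_equal_apply_status_styling_py := by
  intro html _
  unfold Spec_apply_status_styling_py apply_status_styling_py apply_status_styling_py_alt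
  simp only [List.foldl]
  rw [step_PASS, step_FAIL, step_WARNING, step_PASSED, step_FAILED]
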